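-- pv_equiv track=rewrite | github.com/edytaroz/WDI | zad16wdi7.py | osemkowe
-- ===== SOURCE A (Python) =====
-- def osemkowe(x):
--     count = 0
--     while x > 0:
--         if x%8 == 5:
--             count += 1
--         x = x // 8
--     if count > 0 and count%2 == 0:
--         return True
--     return False
-- ===== SOURCE B (Python) =====
-- def osemkowe(x):
--     if x <= 0:
--         return False
--     count = oct(x).count('5')
--     return count > 0 and count % 2 == 0
-- ===== Notes on version B (the rewrite author's own statement) =====
-- stated objective: idiomatic
-- what changed: Replaces the hand-written modulo/floor-division digit loop with a running counter by a single oct() base conversion plus one string count of '5'.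
import Mathlib
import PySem

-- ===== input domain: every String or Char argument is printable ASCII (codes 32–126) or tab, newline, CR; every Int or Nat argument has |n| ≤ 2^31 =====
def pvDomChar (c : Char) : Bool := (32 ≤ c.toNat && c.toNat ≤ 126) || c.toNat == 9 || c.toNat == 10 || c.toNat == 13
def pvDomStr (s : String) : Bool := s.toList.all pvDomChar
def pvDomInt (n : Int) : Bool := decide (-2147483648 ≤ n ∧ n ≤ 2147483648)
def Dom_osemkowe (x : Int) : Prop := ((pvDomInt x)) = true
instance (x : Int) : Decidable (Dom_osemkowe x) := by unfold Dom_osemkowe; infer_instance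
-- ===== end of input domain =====

-- B replaces A's modulo/floor-division counting loop by an oct() conversion plus one string count ('idiomatic').

-- ===== PORT A =====
-- the while-loop of A: state is (x, count)
def osemkoweLoop (x : Int) (count : Int) : Int :=
  if h : x > 0 then
    osemkoweLoop (PySem.Int.floordiv x 8)
      (if PySem.Int.mod x 8 = 5 then count + 1 else count)
  else count
  termination_by x.toNat
  decreasing_by
    have := PySem.Int.floordiv_eq_ediv_of_pos (a := x) (b := 8) (by norm_num)
    omega

def osemkowe (x : Int) : Bool :=
  let count := osemkoweLoop x 0
  if count > 0 ∧ PySem.Int.mod count 2 = 0 then true else false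

-- ===== PORT B =====
-- oct(x) for x > 0: "0o" followed by the octal digits, most significant first (ported by hand; exact for x > 0)
def octDigitChar (d : Int) : Char := Char.ofNat (48 + d.toNat)

def octDigits (x : Int) : List Char :=
  if _h : x > 0 then
    octDigits (PySem.Int.floordiv x 8) ++ [octDigitChar (PySem.Int.mod x 8)]
  else []
  termination_by x.toNat
  decreasing_by
    have := PySem.Int.floordiv_eq_ediv_of_pos (a := x) (b := 8) (by norm_num)
    omega

def osemkowe_alt (x : Int) : Bool :=
  if x ≤ 0 then false
  else
    let count := ('0' :: 'o' :: octDigits x).count '5'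
    decide (count > 0 ∧ count % 2 = 0)

-- ===== PRECONDITION & SPEC =====
def Spec_osemkowe (x : Int) (out : Bool) : Prop := out = osemkowe_alt x
instance (x : Int) (out : Bool) : Decidable (Spec_osemkowe x out) := by unfold Spec_osemkowe; infer_instance

-- ===== CLAIM (what is proved, stated in full; the proofs are below) =====
def Claim_equal_osemkowe : Prop := ∀ (x : Int), Dom_osemkowe x → Spec_osemkowe x (osemkowe x)

-- ===== LEMMAS AND PROOFS =====

theorem osemkoweLoop_eq_count (x : Int) (c : Int) :
    osemkoweLoop x c = c + ((octDigits x).count '5' : Int) := by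
  by_cases h : x > 0
  · rw [osemkoweLoop, dif_pos h, octDigits, dif_pos h,
        osemkoweLoop_eq_count (PySem.Int.floordiv x 8)]
    have hm : 0 ≤ PySem.Int.mod x 8 ∧ PySem.Int.mod x 8 < 8 := by
      have := PySem.Int.mod_eq_emod_of_pos (a := x) (b := 8) (by norm_num)
      omega
    have hchar : (octDigitChar (PySem.Int.mod x 8) = '5') ↔ (PySem.Int.mod x 8 = 5) := by
      obtain ⟨h0, h8⟩ := hm
      unfold octDigitChar
      interval_cases (PySem.Int.mod x 8) <;> simp
    rw [List.count_append]
    by_cases h5 : PySem.Int.mod x 8 = 5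
    · rw [if_pos h5]
      have h1 : List.count '5' [octDigitChar (PySem.Int.mod x 8)] = 1 := by
        rw [hchar.mpr h5]; decide
      rw [h1]; push_cast; ring
    · rw [if_neg h5]
      have h0 : List.count '5' [octDigitChar (PySem.Int.mod x 8)] = 0 := by
        simp only [List.count_cons, List.count_nil, Nat.zero_add]
        rw [if_neg]
        simp only [beq_iff_eq]
        exact fun hc => h5 (hchar.mp hc)
      rw [h0]; simp
  · rw [osemkoweLoop, dif_neg h, octDigits, dif_neg h]
    simp
  termination_by x.toNat
  decreasing_by
    have := PySem.Int.floordiv_eq_ediv_of_pos (a := x) (b := 8) (by norm_num)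
    omega

-- ===== VERDICT (by name: the statement is the Claim_ definition above) =====
theorem osemkowe_spec : Claim_equal_osemkowe := by
  intro x _
  unfold Spec_osemkowe osemkowe osemkowe_alt
  by_cases hx : x ≤ 0
  · rw [if_pos hx, osemkoweLoop, dif_neg (by omega)]
    norm_num
  · rw [if_neg hx]
    simp only [osemkoweLoop_eq_count x 0, zero_add]
    have h05 : ('0' == '5') = false := by decide
    have ho5 : ('o' == '5') = false := by decide
    simp only [List.count_cons, h05, ho5, Bool.false_eq_true, if_false, Nat.add_zero]
    set n : Nat := (octDigits x).count '5' with hn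
    by_cases hc : (n : Int) > 0 ∧ PySem.Int.mod (n : Int) 2 = 0
    · rw [if_pos hc]
      have := PySem.Int.mod_eq_emod_of_pos (a := (n : Int)) (b := 2) (by norm_num)
      symm
      simp only [decide_eq_true_iff]
      omega
    · rw [if_neg hc]
      have := PySem.Int.mod_eq_emod_of_pos (a := (n : Int)) (b := 2) (by norm_num)
      symm
      simp only [decide_eq_false_iff_not]
      omega
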